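-- pv_equiv track=rewrite | github.com/dazzlingwuming/Automatic-Revision-Skill-for-Anonymous-Paper-Review | scripts/parse_revision_plan_markdown.py | _top_sections
-- ===== SOURCE A (Python) =====
-- def _top_sections(text: str) -> dict[str, str]:
--     sections: dict[str, list[str]] = {}
--     current = ""
--     for line in text.splitlines():
--         if line.startswith("## "):
--             current = line[3:].strip()
--             sections[current] = []
--         elif current:
--             sections[current].append(line)
--     return {key: "\n".join(lines).strip() for key, lines in sections.items()}
-- ===== SOURCE B (Python) =====
-- def _top_sections(text: str) -> dict[str, str]:
--     # Segment scan: jump from header to header and slice each body out in one go.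
--     lines = text.splitlines()
--     n = len(lines)
--     out: dict[str, str] = {}
--     i = 0
--     while i < n:
--         if lines[i].startswith("## "):
--             title = lines[i][3:].strip()
--             j = i + 1
--             while j < n and not lines[j].startswith("## "):
--                 j += 1
--             out[title] = "\n".join(lines[i + 1:j]).strip()
--             i = j
--         else:
--             i += 1
--     return out
-- ===== Notes on version B (the rewrite author's own statement) =====
-- stated objective: alternative
-- what changed: B replaces A's line-by-line state machine (current-title variable plus a dict of growing line lists finalized by a second comprehension pass) with a segment scan that jumps from '## ' header to header and slices each body out in one go, joining and stripping it immediately.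
-- intended difference: On texts whose last '## ' header with an all-whitespace title has a body segment (up to the next header) containing a non-whitespace character, A maps the empty-title key to an empty string because its falsy current variable silently drops the body lines, while B maps it to that body joined and stripped, which is the intended sectioning. — e.g. on _top_sections("## \nx"): A returns [("", "")], B returns [("", "x")]
import Mathlib
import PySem

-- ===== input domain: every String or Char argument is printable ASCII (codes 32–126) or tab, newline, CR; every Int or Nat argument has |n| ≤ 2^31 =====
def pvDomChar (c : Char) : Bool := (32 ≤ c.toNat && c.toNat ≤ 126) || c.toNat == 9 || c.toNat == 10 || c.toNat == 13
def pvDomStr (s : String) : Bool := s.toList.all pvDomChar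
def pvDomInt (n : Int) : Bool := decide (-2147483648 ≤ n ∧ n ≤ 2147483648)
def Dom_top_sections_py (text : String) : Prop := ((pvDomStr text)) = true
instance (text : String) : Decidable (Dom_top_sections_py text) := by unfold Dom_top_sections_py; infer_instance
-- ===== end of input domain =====

-- B replaces A's line-by-line accumulator dict with a segment scan that slices each
-- section body out between consecutive '## ' headers (objective: alternative decomposition);
-- on a '## ' header whose title strips to empty, A silently drops the body while B keeps it.

-- ===== PORT A =====
-- A's loop: for line in text.splitlines(): header → start a new (possibly reset) entry;
-- elif current (truthy, i.e. nonempty) → append the line to sections[current].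
-- sections[current].append(line): the key is always present here (current was set by a
-- header), so Dict.modify with default [] computes exactly the same update.
def topSecAGo : List String → PySem.Dict String (List String) → String → PySem.Dict String (List String)
  | [], sections, _ => sections
  | line :: rest, sections, current =>
    if PySem.Str.startswith line "## " then
      let c := PySem.Str.strip (PySem.Str.slice line (some 3) none)
      topSecAGo rest (sections.insert c []) c
    else if current ≠ "" then
      topSecAGo rest (sections.modify current [] (fun ls => ls ++ [line])) current
    else
      topSecAGo rest sections current

-- final dict comprehension: {key: "\n".join(lines).strip() for key, lines in sections.items()}
def top_sections_py (text : String) : List (String × String) :=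
  let sections := topSecAGo (PySem.Str.splitlines text) PySem.Dict.empty ""
  (sections.items.foldl
    (fun (acc : PySem.Dict String String) kv =>
      acc.insert kv.1 (PySem.Str.strip (PySem.Str.join "\n" kv.2)))
    PySem.Dict.empty).items

-- ===== PORT B =====
-- B's outer while loop: jump from header to header; the inner 'while j < n and not
-- lines[j].startswith("## ")' advance of j and the slice lines[i+1:j] are the
-- takeWhile/dropWhile split of the remaining lines at the next header.
def topSecBGo : List String → PySem.Dict String String → PySem.Dict String String
  | [], out => out
  | line :: rest, out =>
    if PySem.Str.startswith line "## " then
      let title := PySem.Str.strip (PySem.Str.slice line (some 3) none)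
      let body := rest.takeWhile (fun x => !PySem.Str.startswith x "## ")
      topSecBGo (rest.dropWhile (fun x => !PySem.Str.startswith x "## "))
        (out.insert title (PySem.Str.strip (PySem.Str.join "\n" body)))
    else
      topSecBGo rest out
  termination_by lines _ => lines.length
  decreasing_by
    · have := List.length_dropWhile_le (fun x => !PySem.Str.startswith x "## ") rest
      simp only [List.length_cons]; omega
    · simp only [List.length_cons]; omega

def top_sections_py_alt (text : String) : List (String × String) :=
  (topSecBGo (PySem.Str.splitlines text) PySem.Dict.empty).items

-- ===== PRECONDITION & SPEC =====
-- On texts whose last '## ' header with an all-whitespace title (a line stripping to "##")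
-- has a body segment (up to the next header) containing a non-whitespace character, A
-- returns '' for the empty-string key (its falsy `current` variable silently drops the body
-- lines), while B returns that body joined and stripped, the intended sectioning.
def D_top_sections_py (text : String) : Prop :=
  let eh := fun x => PySem.Str.startswith x "## " && PySem.Str.strip x == "##"
  let ls := PySem.Str.splitlines text
  ls.any eh &&
    ((ls.reverse.takeWhile (!eh ·)).reverse.takeWhile
      (!PySem.Str.startswith · "## ")).any (PySem.Str.strip · != "")
instance (text : String) : Decidable (D_top_sections_py text) := by unfold D_top_sections_py; infer_instance

def Spec_top_sections_py (text : String) (out : List (String × String)) : Prop := ¬ D_top_sections_py text → out = top_sections_py_alt text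
instance (text : String) (out : List (String × String)) : Decidable (Spec_top_sections_py text out) := by unfold Spec_top_sections_py; infer_instance

def pvDiffWitness_top_sections_py : String := "## \nx"
def pvDiffWitnessOut_top_sections_py : (List (String × String)) × (List (String × String)) :=
  ([("", "")], [("", "x")])

-- ===== CLAIM (what is proved, stated in full; the proofs are below) =====
def Claim_unchanged_top_sections_py : Prop := ∀ (text : String), Dom_top_sections_py text → Spec_top_sections_py text (top_sections_py text)
def Claim_changed_top_sections_py : Prop := Dom_top_sections_py (pvDiffWitness_top_sections_py) ∧ D_top_sections_py (pvDiffWitness_top_sections_py) ∧ top_sections_py (pvDiffWitness_top_sections_py) = pvDiffWitnessOut_top_sections_py.1 ∧ top_sections_py_alt (pvDiffWitness_top_sections_py) = pvDiffWitnessOut_top_sections_py.2 ∧ pvDiffWitnessOut_top_sections_py.1 ≠ pvDiffWitnessOut_top_sections_py.2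
def Claim_exact_top_sections_py : Prop := ∀ (text : String), Dom_top_sections_py text → D_top_sections_py text → top_sections_py text ≠ top_sections_py_alt text

-- ===== LEMMAS AND PROOFS =====

-- the empty-title-header and non-blank-line tests, on the character level
def topSecEH (x : String) : Bool :=
  PySem.Str.startswith x "## " && (PySem.Str.slice x (some 3) none).toList.all PySem.Chars.isspace
def topSecNB (x : String) : Bool := !x.toList.all PySem.Chars.isspace

-- the change region, recursively: the LAST empty-title header has a non-blank body
def topSecBad : List String → Bool
  | [] => false
  | l :: rest =>
    if topSecEH l then
      if rest.any topSecEH then topSecBad rest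
      else (rest.takeWhile (fun x => !PySem.Str.startswith x "## ")).any topSecNB
    else topSecBad rest

-- the value finalization A applies to the accumulated dict
def topSecFin (d : PySem.Dict String (List String)) : PySem.Dict String String :=
  d.items.foldl
    (fun (acc : PySem.Dict String String) kv =>
      acc.insert kv.1 (PySem.Str.strip (PySem.Str.join "\n" kv.2)))
    PySem.Dict.empty

theorem topSec_keys_fin (d : PySem.Dict String (List String)) (h : d.keys.Nodup) :
    (topSecFin d).items =
      d.items.map (fun p => (p.1, PySem.Str.strip (PySem.Str.join "\n" p.2))) := by
  unfold topSecFin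
  have := PySem.Dict.items_foldl_insert_fresh (l := d.items) (k := Prod.fst)
    (v := fun p => PySem.Str.strip (PySem.Str.join "\n" p.2)) (d := PySem.Dict.empty)
    (by intro a _; exact PySem.Dict.contains_empty _) (by simpa [PySem.Dict.keys] using h)
  simpa using this

theorem topSecFin_keys (d : PySem.Dict String (List String)) (h : d.keys.Nodup) :
    (topSecFin d).keys = d.keys := by
  simp only [PySem.Dict.keys, topSec_keys_fin d h, List.map_map]
  rfl

theorem topSecFin_insert (d : PySem.Dict String (List String)) (k : String)
    (v : List String) (h : d.keys.Nodup) :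
    topSecFin (d.insert k v)
      = (topSecFin d).insert k (PySem.Str.strip (PySem.Str.join "\n" v)) := by
  apply PySem.Dict.ext
  rw [topSec_keys_fin _ (PySem.Dict.nodup_keys_insert d k v h)]
  rw [PySem.Dict.items_insert, PySem.Dict.items_insert]
  have hc : (topSecFin d).contains k = d.contains k := by
    rw [PySem.Dict.contains_eq_decide_mem_keys, PySem.Dict.contains_eq_decide_mem_keys,
      topSecFin_keys d h]
  rw [hc, topSec_keys_fin d h]
  by_cases hck : d.contains k = true
  · simp only [hck, if_true, List.map_map]
    apply List.map_congr_left
    intro p _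
    by_cases hp : p.1 = k <;> simp [hp, Function.comp]
  · simp [hck]

theorem topSec_modify_insert (d : PySem.Dict String (List String)) (k : String)
    (v : List String) (f : List String → List String) :
    (d.insert k v).modify k [] f = d.insert k (f v) := by
  simp only [PySem.Dict.modify, PySem.Dict.getD_insert_self, PySem.Dict.insert_insert_self]

-- step equations for the two loops, phrased on the head line's header test
theorem topSecAGo_cons_header (l : String) (rest : List String)
    (d : PySem.Dict String (List String)) (cur : String)
    (h : PySem.Str.startswith l "## " = true) :
    topSecAGo (l :: rest) d cur
      = topSecAGo rest (d.insert (PySem.Str.strip (PySem.Str.slice l (some 3) none)) [])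
          (PySem.Str.strip (PySem.Str.slice l (some 3) none)) := by
  simp only [topSecAGo, h, if_true]

theorem topSecAGo_cons_body (l : String) (rest : List String)
    (d : PySem.Dict String (List String)) (cur : String)
    (h : PySem.Str.startswith l "## " = false) (hc : cur ≠ "") :
    topSecAGo (l :: rest) d cur
      = topSecAGo rest (d.modify cur [] (fun ls => ls ++ [l])) cur := by
  simp only [topSecAGo, h, Bool.false_eq_true, if_false, hc, ne_eq, not_false_iff, if_true]

theorem topSecAGo_cons_skip (l : String) (rest : List String)
    (d : PySem.Dict String (List String))
    (h : PySem.Str.startswith l "## " = false) :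
    topSecAGo (l :: rest) d "" = topSecAGo rest d "" := by
  simp only [topSecAGo, h, Bool.false_eq_true, if_false, ne_eq, not_true_eq_false]

theorem topSecBGo_cons_header (l : String) (rest : List String)
    (out : PySem.Dict String String)
    (h : PySem.Str.startswith l "## " = true) :
    topSecBGo (l :: rest) out
      = topSecBGo (rest.dropWhile (fun x => !PySem.Str.startswith x "## "))
          (out.insert (PySem.Str.strip (PySem.Str.slice l (some 3) none))
            (PySem.Str.strip (PySem.Str.join "\n"
               (rest.takeWhile (fun x => !PySem.Str.startswith x "## "))))) := by
  rw [topSecBGo]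
  simp only [h, if_true]

theorem topSecBGo_cons_skip (l : String) (rest : List String)
    (out : PySem.Dict String String)
    (h : PySem.Str.startswith l "## " = false) :
    topSecBGo (l :: rest) out = topSecBGo rest out := by
  rw [topSecBGo]
  simp only [h, Bool.false_eq_true, if_false]

-- A's loop with an empty current title skips lines up to the next header
theorem topSecAGo_skip (rest : List String) (d : PySem.Dict String (List String)) :
    topSecAGo rest d ""
      = topSecAGo (rest.dropWhile (fun x => !PySem.Str.startswith x "## ")) d "" := by
  induction rest generalizing d with
  | nil => rfl
  | cons b rest ih =>
    rw [List.dropWhile_cons]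
    by_cases hb : PySem.Str.startswith b "## " = true
    · simp only [hb, Bool.not_true, Bool.false_eq_true, if_false]
    · simp only [Bool.not_eq_true] at hb
      simp only [hb, Bool.not_false, if_true]
      rw [topSecAGo_cons_skip b rest d hb]
      exact ih d

-- A's loop with a nonempty current title appends every line up to the next header
theorem topSecAGo_seg (rest : List String) (t : String) (ht : t ≠ "")
    (d : PySem.Dict String (List String)) (v : List String) :
    topSecAGo rest (d.insert t v) t
      = topSecAGo (rest.dropWhile (fun x => !PySem.Str.startswith x "## "))
          (d.insert t (v ++ rest.takeWhile (fun x => !PySem.Str.startswith x "## "))) t := by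
  induction rest generalizing v with
  | nil => simp
  | cons b rest ih =>
    rw [List.dropWhile_cons, List.takeWhile_cons]
    by_cases hb : PySem.Str.startswith b "## " = true
    · simp only [hb, Bool.not_true, Bool.false_eq_true, if_false, List.append_nil]
    · simp only [Bool.not_eq_true] at hb
      simp only [hb, Bool.not_false, if_true]
      rw [topSecAGo_cons_body b rest _ t hb ht, topSec_modify_insert, ih (v ++ [b])]
      simp

-- the head of dropWhile, if any, fails the predicate
theorem topSec_dropWhile_head {α : Type} (p : α → Bool) (l : List α) (x : α) (xs : List α)
    (h : l.dropWhile p = x :: xs) : p x = false := by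
  have := List.head?_dropWhile_not p l
  rw [h] at this
  exact this

-- stripping an all-whitespace character list gives []
theorem topSec_strip_of_all_space (cs : List Char) (h : cs.all PySem.Chars.isspace = true) :
    PySem.Chars.strip cs = [] := by
  simp only [List.all_eq_true] at h
  have hl : PySem.Chars.lstrip cs = [] := by
    simp only [PySem.Chars.lstrip, List.dropWhile_eq_nil_iff]
    intro x hx; exact h x hx
  simp [PySem.Chars.strip, hl, PySem.Chars.rstrip]

-- conversely, a list whose strip is [] is all whitespace
theorem topSec_all_space_of_strip (cs : List Char) (h : PySem.Chars.strip cs = []) :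
    cs.all PySem.Chars.isspace = true := by
  simp only [PySem.Chars.strip, PySem.Chars.rstrip, PySem.Chars.lstrip,
    List.reverse_eq_nil_iff, List.dropWhile_eq_nil_iff, List.mem_reverse] at h
  rw [List.all_eq_true]
  intro x hx
  by_cases hd : ∀ y ∈ cs, PySem.Chars.isspace y = true
  · exact hd x hx
  · exfalso
    have hne : cs.dropWhile PySem.Chars.isspace ≠ [] := by
      simp only [ne_eq, List.dropWhile_eq_nil_iff]
      exact hd
    match heq : cs.dropWhile PySem.Chars.isspace with
    | [] => exact hne heq
    | y :: ys =>
      have hy : PySem.Chars.isspace y = false := topSec_dropWhile_head _ cs y ys heq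
      have : PySem.Chars.isspace y = true := h y (by rw [heq]; exact List.mem_cons_self ..)
      simp [hy] at this

-- a header's stripped title is "" exactly when the sliced title is all whitespace
theorem topSec_title_empty_of_all_space (l : String)
    (h : (PySem.Str.slice l (some 3) none).toList.all PySem.Chars.isspace = true) :
    PySem.Str.strip (PySem.Str.slice l (some 3) none) = "" := by
  apply String.toList_eq_nil_iff.mp
  rw [PySem.Str.toList_strip]
  exact topSec_strip_of_all_space _ h

theorem topSec_all_space_of_title_empty (l : String)
    (h : PySem.Str.strip (PySem.Str.slice l (some 3) none) = "") :
    (PySem.Str.slice l (some 3) none).toList.all PySem.Chars.isspace = true := by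
  apply topSec_all_space_of_strip
  rw [← PySem.Str.toList_strip, h]
  rfl

-- joining all-whitespace lines with "\n" and stripping gives the empty string
theorem topSec_join_all_space (parts : List (List Char))
    (h : ∀ x ∈ parts, x.all PySem.Chars.isspace = true) :
    (PySem.Chars.join ['\n'] parts).all PySem.Chars.isspace = true := by
  induction parts with
  | nil => simp [PySem.Chars.join, List.intercalate]
  | cons b bs ih =>
    match bs with
    | [] =>
      simp only [PySem.Chars.join, List.intercalate, List.intersperse, List.flatten]
      simpa using h b (List.mem_cons_self ..)
    | b' :: bs' =>
      rw [PySem.Chars.join_cons_cons]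
      simp only [List.all_append, Bool.and_eq_true]
      exact ⟨⟨h b (List.mem_cons_self ..), by decide⟩,
        ih (fun x hx => h x (List.mem_cons_of_mem _ hx))⟩

theorem topSec_join_blank (body : List String)
    (h : ∀ x ∈ body, x.toList.all PySem.Chars.isspace = true) :
    PySem.Str.strip (PySem.Str.join "\n" body) = "" := by
  have hall : (PySem.Str.join "\n" body).toList.all PySem.Chars.isspace = true := by
    rw [PySem.Str.toList_join]
    exact topSec_join_all_space _ (by intro x hx; rcases List.mem_map.mp hx with ⟨y, hy, rfl⟩; exact h y hy)
  have hnil : (PySem.Str.strip (PySem.Str.join "\n" body)).toList = [] := by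
    rw [PySem.Str.toList_strip]
    exact topSec_strip_of_all_space _ hall
  exact String.toList_eq_nil_iff.mp hnil

-- every character of a joined part occurs in the join
theorem topSec_mem_join (parts : List (List Char)) (b : List Char) (c : Char)
    (hb : b ∈ parts) (hc : c ∈ b) : c ∈ PySem.Chars.join ['\n'] parts := by
  induction parts with
  | nil => simp at hb
  | cons p ps ih =>
    match ps with
    | [] =>
      simp only [List.mem_singleton] at hb
      subst hb
      simpa [PySem.Chars.join, List.intercalate, List.intersperse, List.flatten] using hc
    | q :: qs =>
      rw [PySem.Chars.join_cons_cons]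
      rcases List.mem_cons.mp hb with rfl | hb'
      · exact List.mem_append_left _ (List.mem_append_left _ hc)
      · exact List.mem_append_right _ (ih hb')

-- a non-blank line in the body makes the joined, stripped body non-empty
theorem topSec_join_nonblank (body : List String) (x : String)
    (hx : x ∈ body) (hnb : topSecNB x = true) :
    PySem.Str.strip (PySem.Str.join "\n" body) ≠ "" := by
  intro h
  have hall : (PySem.Str.join "\n" body).toList.all PySem.Chars.isspace = true := by
    apply topSec_all_space_of_strip
    rw [← PySem.Str.toList_strip, h]
    rfl
  simp only [topSecNB, Bool.not_eq_true', List.all_eq_false] at hnb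
  rcases hnb with ⟨c, hc, hcs⟩
  have : PySem.Chars.isspace c = true := by
    rw [List.all_eq_true] at hall
    apply hall
    rw [PySem.Str.toList_join]
    exact topSec_mem_join _ x.toList c (List.mem_map_of_mem hx) hc
  simp [hcs] at this

-- a non-header line is not an empty-title header
theorem topSec_EH_false_of_not_header (l : String)
    (h : PySem.Str.startswith l "## " = false) : topSecEH l = false := by
  unfold topSecEH
  rw [h, Bool.false_and]

-- a header whose stripped title is nonempty is not an empty-title header
theorem topSec_EH_false_of_title_ne (l : String)
    (ht : PySem.Str.strip (PySem.Str.slice l (some 3) none) ≠ "") : topSecEH l = false := by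
  by_cases hh : PySem.Str.startswith l "## " = true
  · simp only [topSecEH, hh, Bool.true_and]
    by_cases hs : (PySem.Str.slice l (some 3) none).toList.all PySem.Chars.isspace = true
    · exact absurd (topSec_title_empty_of_all_space l hs) ht
    · simpa using hs
  · exact topSec_EH_false_of_not_header l (by simpa using hh)

-- badness and empty-header presence are insensitive to a non-header prefix
theorem topSec_anyEH_dropWhile (rest : List String) :
    rest.any topSecEH
      = (rest.dropWhile (fun x => !PySem.Str.startswith x "## ")).any topSecEH := by
  induction rest with
  | nil => rfl
  | cons x xs ih =>
    rw [List.dropWhile_cons]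
    by_cases hx : PySem.Str.startswith x "## " = true
    · simp only [hx, Bool.not_true, Bool.false_eq_true, if_false]
    · simp only [Bool.not_eq_true] at hx
      simp only [hx, Bool.not_false, if_true, List.any_cons,
        topSec_EH_false_of_not_header x hx, Bool.false_or]
      exact ih

theorem topSec_bad_dropWhile (rest : List String) :
    topSecBad rest
      = topSecBad (rest.dropWhile (fun x => !PySem.Str.startswith x "## ")) := by
  induction rest with
  | nil => rfl
  | cons x xs ih =>
    rw [List.dropWhile_cons]
    by_cases hx : PySem.Str.startswith x "## " = true
    · simp only [hx, Bool.not_true, Bool.false_eq_true, if_false]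
    · simp only [Bool.not_eq_true] at hx
      simp only [hx, Bool.not_false, if_true]
      rw [topSecBad, topSec_EH_false_of_not_header x hx]
      simpa using ih

-- with no empty-title header, badness is impossible
theorem topSec_bad_false_of_no_EH (l : List String) (h : l.any topSecEH = false) :
    topSecBad l = false := by
  induction l with
  | nil => rfl
  | cons x xs ih =>
    simp only [List.any_cons, Bool.or_eq_false_iff] at h
    rw [topSecBad, h.1]
    simpa using ih h.2

theorem topSec_bad_tail (l : String) (rest : List String)
    (h : topSecBad (l :: rest) = false) : topSecBad rest = false := by
  rw [topSecBad] at h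
  by_cases he : topSecEH l = true
  · simp only [he, if_true] at h
    by_cases ha : rest.any topSecEH = true
    · simpa [ha] using h
    · exact topSec_bad_false_of_no_EH rest (by simpa using ha)
  · simpa [he] using h

-- ===== the masked-dict machinery for the unchanged proof =====
-- two output dicts are mask-equal when they agree except possibly at the value of key ""
def topSecMaskP (p : String × String) : String × String := if p.1 = "" then ("", "") else p

def topSecMaskEq (e1 e2 : PySem.Dict String String) : Prop :=
  e1.items.map topSecMaskP = e2.items.map topSecMaskP

theorem topSec_maskP_fst (p : String × String) : (topSecMaskP p).1 = p.1 := by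
  unfold topSecMaskP
  by_cases h : p.1 = "" <;> simp [h]

theorem topSec_keys_of_maskEq (e1 e2 : PySem.Dict String String) (h : topSecMaskEq e1 e2) :
    e1.keys = e2.keys := by
  have := congrArg (List.map Prod.fst) h
  simp only [List.map_map] at this
  simpa only [PySem.Dict.keys, Function.comp_def, topSec_maskP_fst] using this

theorem topSec_contains_of_maskEq (e1 e2 : PySem.Dict String String) (h : topSecMaskEq e1 e2)
    (k : String) : e1.contains k = e2.contains k := by
  rw [PySem.Dict.contains_eq_decide_mem_keys, PySem.Dict.contains_eq_decide_mem_keys,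
    topSec_keys_of_maskEq e1 e2 h]

theorem topSec_maskEq_insert_ne (e1 e2 : PySem.Dict String String) (t v : String)
    (ht : t ≠ "") (h : topSecMaskEq e1 e2) :
    topSecMaskEq (e1.insert t v) (e2.insert t v) := by
  unfold topSecMaskEq
  rw [PySem.Dict.items_insert, PySem.Dict.items_insert, topSec_contains_of_maskEq e1 e2 h t]
  by_cases hc : e2.contains t = true
  · simp only [hc, if_true, List.map_map]
    have hfun : ∀ (l : List (String × String)),
        l.map (topSecMaskP ∘ fun p => if p.1 == t then (t, v) else p)
          = (l.map topSecMaskP).map (fun p => if p.1 == t then (t, v) else p) := by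
      intro l
      rw [List.map_map]
      apply List.map_congr_left
      intro p _
      simp only [Function.comp]
      by_cases hp : p.1 = t
      · simp [hp, topSecMaskP, ht]
      · have hb : (p.1 == t) = false := by simpa using hp
        simp only [hb, Bool.false_eq_true, if_false]
        by_cases hp0 : p.1 = ""
        · have : (("" : String) == t) = false := by simpa using (Ne.symm ht)
          simp [topSecMaskP, hp0, this]
        · simp only [topSecMaskP, hp0, if_false]
          simp [hb]
    rw [hfun, hfun, h]
  · simp only [hc, Bool.false_eq_true, if_false, List.map_append]
    rw [h]

theorem topSec_maskEq_insert_empty (e1 e2 : PySem.Dict String String) (v1 v2 : String)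
    (h : topSecMaskEq e1 e2) :
    topSecMaskEq (e1.insert "" v1) (e2.insert "" v2) := by
  unfold topSecMaskEq
  rw [PySem.Dict.items_insert, PySem.Dict.items_insert, topSec_contains_of_maskEq e1 e2 h ""]
  have hfun : ∀ (l : List (String × String)) (v : String),
      (l.map (fun p => if p.1 == "" then ("", v) else p)).map topSecMaskP
        = l.map topSecMaskP := by
    intro l v
    rw [List.map_map]
    apply List.map_congr_left
    intro p _
    simp only [Function.comp]
    by_cases hp : p.1 = ""
    · have hb : (p.1 == "") = true := by simpa using hp
      simp [topSecMaskP, hp]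
    · have hb : (p.1 == "") = false := by simpa using hp
      simp [topSecMaskP, hp]
  by_cases hc : e2.contains "" = true
  · simp only [hc, if_true]
    rw [hfun, hfun, h]
  · simp only [hc, Bool.false_eq_true, if_false, List.map_append]
    rw [h]
    simp [topSecMaskP]

theorem topSec_no_empty_key (e : PySem.Dict String String) (hc : e.contains "" = false)
    (p : String × String) (hp : p ∈ e.items) : p.1 ≠ "" := by
  intro h0
  rw [PySem.Dict.contains_eq_decide_mem_keys] at hc
  simp only [decide_eq_false_iff_not] at hc
  exact hc (h0 ▸ PySem.Dict.mem_keys_of_mem_items e hp)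

theorem topSec_eq_of_maskEq_insert_empty (e1 e2 : PySem.Dict String String) (v : String)
    (h : topSecMaskEq e1 e2) :
    e1.insert "" v = e2.insert "" v := by
  apply PySem.Dict.ext
  rw [PySem.Dict.items_insert, PySem.Dict.items_insert, topSec_contains_of_maskEq e1 e2 h ""]
  by_cases hc : e2.contains "" = true
  · simp only [hc, if_true]
    have hfun : ∀ (l : List (String × String)),
        l.map (fun p => if p.1 == "" then ("", v) else p)
          = (l.map topSecMaskP).map (fun p => if p.1 == "" then ("", v) else p) := by
      intro l
      rw [List.map_map]
      apply List.map_congr_left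
      intro p _
      simp only [Function.comp]
      by_cases hp : p.1 = ""
      · have hb : (p.1 == "") = true := by simpa using hp
        simp [topSecMaskP, hp]
      · have hb : (p.1 == "") = false := by simpa using hp
        simp [topSecMaskP, hp]
    rw [hfun, h, ← hfun]
  · have hc1 : e1.contains "" = false := by
      rw [topSec_contains_of_maskEq e1 e2 h ""]; simpa using hc
    have hid : ∀ (e : PySem.Dict String String), e.contains "" = false →
        e.items.map topSecMaskP = e.items := by
      intro e hce
      exact (List.map_congr_left (fun p hp => by
        simp [topSecMaskP, topSec_no_empty_key e hce p hp])).trans (List.map_id _)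
    simp only [hc, Bool.false_eq_true, if_false]
    rw [← hid e1 hc1, ← hid e2 (by simpa using hc), h]

theorem topSec_maskEq_of_eq (e1 e2 : PySem.Dict String String) (h : e1 = e2) :
    topSecMaskEq e1 e2 := by rw [topSecMaskEq, h]

-- "" join-strips to "" (the value A's finalization gives the empty-title key)
theorem topSec_sjnil : PySem.Str.strip (PySem.Str.join "\n" ([] : List String)) = "" := by
  decide

-- main invariant, three modes at once: with equal dicts the scans stay equal; with
-- mask-equal dicts they end equal as soon as an empty-title header remains (it overwrites
-- the "" key in both), and they stay mask-equal in any case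
theorem topSec_main : ∀ (n : Nat) (lines : List String), lines.length ≤ n →
    topSecBad lines = false →
    ∀ (d : PySem.Dict String (List String)) (e : PySem.Dict String String) (cur : String),
    d.keys.Nodup →
    (cur = "" ∨ lines = [] ∨
      (∃ l rest, lines = l :: rest ∧ PySem.Str.startswith l "## " = true)) →
    (topSecFin d = e → topSecFin (topSecAGo lines d cur) = topSecBGo lines e)
    ∧ (topSecMaskEq (topSecFin d) e → lines.any topSecEH = true →
        topSecFin (topSecAGo lines d cur) = topSecBGo lines e)
    ∧ (topSecMaskEq (topSecFin d) e →
        topSecMaskEq (topSecFin (topSecAGo lines d cur)) (topSecBGo lines e)) := by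
  intro n
  induction n with
  | zero =>
    intro lines hlen _ d e cur _ _
    have : lines = [] := List.eq_nil_of_length_eq_zero (Nat.le_zero.mp hlen)
    subst this
    exact ⟨fun h => by simpa [topSecAGo, topSecBGo] using h,
      fun _ h => by simp at h,
      fun h => by simpa [topSecAGo, topSecBGo] using h⟩
  | succ n ih =>
    intro lines hlen hbad d e cur hnd hok
    match lines with
    | [] =>
      exact ⟨fun h => by simpa [topSecAGo, topSecBGo] using h,
        fun _ h => by simp at h,
        fun h => by simpa [topSecAGo, topSecBGo] using h⟩
    | l :: rest =>
      by_cases hh : PySem.Str.startswith l "## " = true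
      · -- header line
        set t := PySem.Str.strip (PySem.Str.slice l (some 3) none) with hteq
        have hdw : rest.dropWhile (fun x => !PySem.Str.startswith x "## ") = [] ∨
            (∃ x xs, rest.dropWhile (fun x => !PySem.Str.startswith x "## ") = x :: xs ∧
              PySem.Str.startswith x "## " = true) := by
          match hdweq : rest.dropWhile (fun x => !PySem.Str.startswith x "## ") with
          | [] => exact Or.inl rfl
          | x :: xs =>
            refine Or.inr ⟨x, xs, rfl, ?_⟩
            have := topSec_dropWhile_head (fun x => !PySem.Str.startswith x "## ") rest x xs hdweq
            simpa using this
        have hshape : (rest.dropWhile (fun x => !PySem.Str.startswith x "## ") = []) ∨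
            (∃ l' rest', rest.dropWhile (fun x => !PySem.Str.startswith x "## ") = l' :: rest' ∧
              PySem.Str.startswith l' "## " = true) := hdw
        have hlen' : (rest.dropWhile (fun x => !PySem.Str.startswith x "## ")).length ≤ n := by
          have h1 := List.length_dropWhile_le (fun x => !PySem.Str.startswith x "## ") rest
          simp only [List.length_cons] at hlen
          omega
        have hbadr : topSecBad rest = false := topSec_bad_tail l rest hbad
        have hbad' : topSecBad (rest.dropWhile (fun x => !PySem.Str.startswith x "## ")) = false := by
          rw [← topSec_bad_dropWhile]; exact hbadr
        by_cases hte : t = ""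
        · -- empty-title header: A opens "" and drops its body, B stores the joined body
          have hEH : topSecEH l = true := by
            simp only [topSecEH, hh, Bool.true_and]
            exact topSec_all_space_of_title_empty l (hteq ▸ hte)
          rw [topSecAGo_cons_header l rest d cur hh, topSecBGo_cons_header l rest e hh, ← hteq,
            hte, topSecAGo_skip]
          by_cases hany : rest.any topSecEH = true
          · -- a later empty-title header overwrites "" in both scans
            have hany' : (rest.dropWhile (fun x => !PySem.Str.startswith x "## ")).any topSecEH = true := by
              rw [← topSec_anyEH_dropWhile]; exact hany
            have ihc := ih _ hlen' hbad' (d.insert "" [])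
              (e.insert "" (PySem.Str.strip (PySem.Str.join "\n"
                (rest.takeWhile (fun x => !PySem.Str.startswith x "## ")))))
              "" (PySem.Dict.nodup_keys_insert _ _ _ hnd) (Or.inl rfl)
            have hmq : ∀ (hm : topSecMaskEq (topSecFin d) e),
                topSecMaskEq (topSecFin (d.insert "" []))
                  (e.insert "" (PySem.Str.strip (PySem.Str.join "\n"
                    (rest.takeWhile (fun x => !PySem.Str.startswith x "## "))))) := by
              intro hm
              rw [topSecFin_insert _ _ _ hnd]
              exact topSec_maskEq_insert_empty _ _ _ _ hm
            refine ⟨fun h => ?_, fun hm _ => ?_, fun hm => ?_⟩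
            · exact ihc.2.1 (hmq (topSec_maskEq_of_eq _ _ h)) hany'
            · exact ihc.2.1 (hmq hm) hany'
            · exact ihc.2.2 (hmq hm)
          · -- last empty-title header: outside D its body is blank, so both store ""
            have hanyf : rest.any topSecEH = false := by simpa using hany
            have hblank : ∀ x ∈ rest.takeWhile (fun x => !PySem.Str.startswith x "## "),
                ¬ topSecNB x = true := by
              rw [topSecBad] at hbad
              simp only [hEH, if_true, hanyf, Bool.false_eq_true, if_false,
                List.any_eq_false] at hbad
              exact hbad
            have hsjb : PySem.Str.strip (PySem.Str.join "\n"
                (rest.takeWhile (fun x => !PySem.Str.startswith x "## "))) = "" := by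
              apply topSec_join_blank
              intro x hx
              have := hblank x hx
              simpa [topSecNB] using this
            rw [hsjb]
            have ihc := ih _ hlen' hbad' (d.insert "" []) (e.insert "" "")
              "" (PySem.Dict.nodup_keys_insert _ _ _ hnd) (Or.inl rfl)
            have hfin : topSecFin (d.insert "" []) = (topSecFin d).insert "" "" := by
              rw [topSecFin_insert _ _ _ hnd, topSec_sjnil]
            refine ⟨fun h => ?_, fun hm _ => ?_, fun hm => ?_⟩
            · exact ihc.1 (by rw [hfin, h])
            · exact ihc.1 (by rw [hfin]; exact topSec_eq_of_maskEq_insert_empty _ _ _ hm)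
            · exact topSec_maskEq_of_eq _ _
                (ihc.1 (by rw [hfin]; exact topSec_eq_of_maskEq_insert_empty _ _ _ hm))
        · -- nonempty title: A collects exactly the body B slices out
          have hEHf : topSecEH l = false := topSec_EH_false_of_title_ne l (hteq ▸ hte)
          rw [topSecAGo_cons_header l rest d cur hh, topSecBGo_cons_header l rest e hh, ← hteq,
            topSecAGo_seg _ _ hte, List.nil_append]
          have ihc := ih _ hlen' hbad'
            (d.insert t (rest.takeWhile (fun x => !PySem.Str.startswith x "## ")))
            (e.insert t (PySem.Str.strip (PySem.Str.join "\n"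
              (rest.takeWhile (fun x => !PySem.Str.startswith x "## ")))))
            t (PySem.Dict.nodup_keys_insert _ _ _ hnd) (Or.inr hshape)
          have hfin : topSecFin (d.insert t (rest.takeWhile (fun x => !PySem.Str.startswith x "## ")))
              = (topSecFin d).insert t (PySem.Str.strip (PySem.Str.join "\n"
                (rest.takeWhile (fun x => !PySem.Str.startswith x "## ")))) :=
            topSecFin_insert _ _ _ hnd
          have hanyt : (l :: rest).any topSecEH = rest.any topSecEH := by
            simp [List.any_cons, hEHf]
          refine ⟨fun h => ?_, fun hm hany => ?_, fun hm => ?_⟩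
          · exact ihc.1 (by rw [hfin, h])
          · have hany' : (rest.dropWhile (fun x => !PySem.Str.startswith x "## ")).any topSecEH = true := by
              rw [← topSec_anyEH_dropWhile, ← hanyt]; exact hany
            exact ihc.2.1 (by rw [hfin]; exact topSec_maskEq_insert_ne _ _ _ _ hte hm) hany'
          · exact ihc.2.2 (by rw [hfin]; exact topSec_maskEq_insert_ne _ _ _ _ hte hm)
      · -- non-header line with no open section: both sides skip it
        have hcur : cur = "" := by
          rcases hok with h0 | h0 | ⟨l', rest', heq, hh'⟩
          · exact h0
          · simp at h0
          · rw [List.cons.injEq] at heq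
            exact absurd (heq.1 ▸ hh') hh
        subst hcur
        have hhf : PySem.Str.startswith l "## " = false := by simpa using hh
        have hlen' : rest.length ≤ n := by simp only [List.length_cons] at hlen; omega
        have hbadr : topSecBad rest = false := topSec_bad_tail l rest hbad
        rw [topSecAGo_cons_skip l rest d hhf, topSecBGo_cons_skip l rest e hhf]
        have ihc := ih _ hlen' hbadr d e "" hnd (Or.inl rfl)
        have hanyt : (l :: rest).any topSecEH = rest.any topSecEH := by
          simp [List.any_cons, topSec_EH_false_of_not_header l hhf]
        exact ⟨ihc.1, fun hm hany => ihc.2.1 hm (by rw [← hanyt]; exact hany), ihc.2.2⟩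

-- ===== the lookup lemmas for the tightness proof =====

-- A's accumulated list for key "" is [] as soon as an empty-title header occurred
theorem topSecAGo_nodup (lines : List String) (d : PySem.Dict String (List String))
    (cur : String) (h : d.keys.Nodup) : (topSecAGo lines d cur).keys.Nodup := by
  induction lines generalizing d cur with
  | nil => exact h
  | cons l rest ih =>
    by_cases hh : PySem.Str.startswith l "## " = true
    · rw [topSecAGo_cons_header l rest d cur hh]
      exact ih _ _ (PySem.Dict.nodup_keys_insert _ _ _ h)
    · have hhf : PySem.Str.startswith l "## " = false := by simpa using hh
      by_cases hc : cur = ""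
      · subst hc
        rw [topSecAGo_cons_skip l rest d hhf]
        exact ih _ _ h
      · rw [topSecAGo_cons_body l rest d cur hhf hc]
        simp only [PySem.Dict.modify]
        exact ih _ _ (PySem.Dict.nodup_keys_insert _ _ _ h)

theorem topSecAGo_get (lines : List String) (d : PySem.Dict String (List String))
    (cur : String) :
    (topSecAGo lines d cur).get? ""
      = if lines.any topSecEH then some [] else d.get? "" := by
  induction lines generalizing d cur with
  | nil => simp [topSecAGo]
  | cons l rest ih =>
    by_cases hh : PySem.Str.startswith l "## " = true
    · rw [topSecAGo_cons_header l rest d cur hh, ih]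
      set t := PySem.Str.strip (PySem.Str.slice l (some 3) none) with hteq
      by_cases hte : t = ""
      · have hEH : topSecEH l = true := by
          simp only [topSecEH, hh, Bool.true_and]
          exact topSec_all_space_of_title_empty l (hteq ▸ hte)
        by_cases hany : rest.any topSecEH = true
        · simp [List.any_cons, hEH, hany]
        · simp only [Bool.not_eq_true] at hany
          simp only [List.any_cons, hEH, hany, if_true, Bool.or_false]
          rw [hte]
          apply PySem.Dict.get?_insert_self
      · have hEHf : topSecEH l = false := topSec_EH_false_of_title_ne l (hteq ▸ hte)
        have hget : (d.insert t []).get? "" = d.get? "" :=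
          PySem.Dict.get?_insert_of_ne _ _ (Ne.symm hte)
        simp [List.any_cons, hEHf, hget]
    · have hhf : PySem.Str.startswith l "## " = false := by simpa using hh
      have hEHf : topSecEH l = false := topSec_EH_false_of_not_header l hhf
      by_cases hc : cur = ""
      · subst hc
        rw [topSecAGo_cons_skip l rest d hhf, ih]
        simp [List.any_cons, hEHf]
      · rw [topSecAGo_cons_body l rest d cur hhf hc, ih]
        have hget : (d.modify cur [] (fun ls => ls ++ [l])).get? "" = d.get? "" := by
          simp only [PySem.Dict.modify]
          exact PySem.Dict.get?_insert_of_ne _ _ (Ne.symm hc)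
        simp [List.any_cons, hEHf, hget]

theorem topSec_fin_get (d : PySem.Dict String (List String)) (hnd : d.keys.Nodup)
    (h : d.get? "" = some []) : (topSecFin d).get? "" = some "" := by
  have hmem : (("" : String), ([] : List String)) ∈ d.items :=
    PySem.Dict.mem_items_of_get?_eq_some d h
  have hmem' : (("" : String), ("" : String)) ∈ (topSecFin d).items := by
    rw [topSec_keys_fin d hnd]
    have := List.mem_map_of_mem
      (f := fun p : String × List String => (p.1, PySem.Str.strip (PySem.Str.join "\n" p.2))) hmem
    simpa [topSec_sjnil] using this
  have hndf : (topSecFin d).keys.Nodup := by rw [topSecFin_keys d hnd]; exact hnd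
  exact PySem.Dict.get?_of_mem_items _ hmem' hndf

-- a bad list certainly contains an empty-title header
theorem topSec_anyEH_of_bad (l : List String) (h : topSecBad l = true) :
    l.any topSecEH = true := by
  induction l with
  | nil => simp [topSecBad] at h
  | cons x xs ih =>
    rw [topSecBad] at h
    by_cases he : topSecEH x = true
    · simp [List.any_cons, he]
    · simp only [he, Bool.false_eq_true, if_false] at h
      simp [List.any_cons, ih h]

-- with no empty-title header remaining, B never touches key ""
theorem topSecBGo_get_noEH : ∀ (n : Nat) (lines : List String), lines.length ≤ n →
    lines.any topSecEH = false →
    ∀ (e : PySem.Dict String String), (topSecBGo lines e).get? "" = e.get? "" := by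
  intro n
  induction n with
  | zero =>
    intro lines hlen _ e
    have : lines = [] := List.eq_nil_of_length_eq_zero (Nat.le_zero.mp hlen)
    subst this; simp [topSecBGo]
  | succ n ih =>
    intro lines hlen hany e
    match lines with
    | [] => simp [topSecBGo]
    | l :: rest =>
      simp only [List.any_cons, Bool.or_eq_false_iff] at hany
      by_cases hh : PySem.Str.startswith l "## " = true
      · rw [topSecBGo_cons_header l rest e hh]
        have hlen' : (rest.dropWhile (fun x => !PySem.Str.startswith x "## ")).length ≤ n := by
          have h1 := List.length_dropWhile_le (fun x => !PySem.Str.startswith x "## ") rest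
          simp only [List.length_cons] at hlen
          omega
        have hany' : (rest.dropWhile (fun x => !PySem.Str.startswith x "## ")).any topSecEH = false := by
          rw [← topSec_anyEH_dropWhile]; exact hany.2
        rw [ih _ hlen' hany']
        have hte : PySem.Str.strip (PySem.Str.slice l (some 3) none) ≠ "" := by
          intro h0
          have : topSecEH l = true := by
            simp only [topSecEH, hh, Bool.true_and]
            exact topSec_all_space_of_title_empty l h0
          rw [hany.1] at this
          exact Bool.false_ne_true this
        exact PySem.Dict.get?_insert_of_ne _ _ (Ne.symm hte)
      · have hhf : PySem.Str.startswith l "## " = false := by simpa using hh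
        have hlen' : rest.length ≤ n := by simp only [List.length_cons] at hlen; omega
        rw [topSecBGo_cons_skip l rest e hhf]
        exact ih _ hlen' hany.2 e

-- on a bad list, B's value at key "" is non-empty
theorem topSecBGo_get_bad : ∀ (n : Nat) (lines : List String), lines.length ≤ n →
    topSecBad lines = true →
    ∀ (e : PySem.Dict String String),
    ∃ v, v ≠ "" ∧ (topSecBGo lines e).get? "" = some v := by
  intro n
  induction n with
  | zero =>
    intro lines hlen hbad _
    have : lines = [] := List.eq_nil_of_length_eq_zero (Nat.le_zero.mp hlen)
    subst this; simp [topSecBad] at hbad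
  | succ n ih =>
    intro lines hlen hbad e
    match lines with
    | [] => simp [topSecBad] at hbad
    | l :: rest =>
      by_cases hh : PySem.Str.startswith l "## " = true
      · rw [topSecBGo_cons_header l rest e hh]
        have hlen' : (rest.dropWhile (fun x => !PySem.Str.startswith x "## ")).length ≤ n := by
          have h1 := List.length_dropWhile_le (fun x => !PySem.Str.startswith x "## ") rest
          simp only [List.length_cons] at hlen
          omega
        by_cases he : topSecEH l = true
        · rw [topSecBad] at hbad
          simp only [he, if_true] at hbad
          by_cases hany : rest.any topSecEH = true
          · simp only [hany, if_true] at hbad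
            have hbad' : topSecBad (rest.dropWhile (fun x => !PySem.Str.startswith x "## ")) = true := by
              rw [← topSec_bad_dropWhile]; exact hbad
            exact ih _ hlen' hbad' _
          · simp only [hany, Bool.false_eq_true, if_false] at hbad
            rcases List.any_eq_true.mp hbad with ⟨x, hx, hnb⟩
            have hne := topSec_join_nonblank _ x hx hnb
            have hanyf : (rest.dropWhile (fun x => !PySem.Str.startswith x "## ")).any topSecEH = false := by
              rw [← topSec_anyEH_dropWhile]; simpa using hany
            refine ⟨_, hne, ?_⟩
            rw [topSecBGo_get_noEH n _ hlen' hanyf]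
            have hEHt : PySem.Str.strip (PySem.Str.slice l (some 3) none) = "" := by
              simp only [topSecEH, hh, Bool.true_and] at he
              exact topSec_title_empty_of_all_space l he
            rw [hEHt]
            apply PySem.Dict.get?_insert_self
        · have hef : topSecEH l = false := by simpa using he
          rw [topSecBad] at hbad
          simp only [hef, Bool.false_eq_true, if_false] at hbad
          have hbad' : topSecBad (rest.dropWhile (fun x => !PySem.Str.startswith x "## ")) = true := by
            rw [← topSec_bad_dropWhile]; exact hbad
          exact ih _ hlen' hbad' _
      · have hhf : PySem.Str.startswith l "## " = false := by simpa using hh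
        have hlen' : rest.length ≤ n := by simp only [List.length_cons] at hlen; omega
        rw [topSecBGo_cons_skip l rest e hhf]
        rw [topSecBad] at hbad
        simp only [topSec_EH_false_of_not_header l hhf, Bool.false_eq_true, if_false] at hbad
        exact ih _ hlen' hbad e

-- ===== the D_ bridge: the compact change-region formula equals topSecBad =====

theorem topSec_lstrip_hash (w : List Char) :
    PySem.Chars.lstrip (['#','#',' '] ++ w) = ['#','#',' '] ++ w := by
  simp [PySem.Chars.lstrip, PySem.Chars.isspace]

theorem topSec_strip_hash (w : List Char) :
    PySem.Chars.strip (['#','#',' '] ++ w) = ['#','#'] ↔ w.all PySem.Chars.isspace = true := by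
  rw [PySem.Chars.strip, topSec_lstrip_hash, PySem.Chars.rstrip, List.reverse_append,
    List.dropWhile_append]
  constructor
  · intro h
    by_cases hie : (List.dropWhile PySem.Chars.isspace w.reverse).isEmpty = true
    · rw [List.isEmpty_iff, List.dropWhile_eq_nil_iff] at hie
      rw [List.all_eq_true]
      intro c hc
      exact hie c (List.mem_reverse.mpr hc)
    · have hie' : (List.dropWhile PySem.Chars.isspace w.reverse).isEmpty = false := by
        simpa using hie
      rw [hie'] at h
      simp only [Bool.false_eq_true, if_false] at h
      have hlen := congrArg List.length h
      simp at hlen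
  · intro hww
    have hie : (List.dropWhile PySem.Chars.isspace w.reverse).isEmpty = true := by
      rw [List.isEmpty_iff, List.dropWhile_eq_nil_iff]
      intro c hc
      exact (List.all_eq_true.mp hww) c (List.mem_reverse.mp hc)
    rw [if_pos hie]
    decide

theorem topSec_eh_eq (x : String) :
    (PySem.Str.startswith x "## " && (PySem.Str.strip x == "##")) = topSecEH x := by
  unfold topSecEH
  by_cases hs : PySem.Str.startswith x "## " = true
  · rw [hs, Bool.true_and, Bool.true_and]
    have hs' : (['#','#',' '] : List Char) <+: x.toList := by
      have h1 : PySem.Chars.startswith x.toList ['#','#',' '] = true := by simpa using hs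
      exact (PySem.Chars.startswith_iff _ _).mp h1
    obtain ⟨w, hw⟩ := hs'
    have hslice : (PySem.Str.slice x (some 3) none).toList = w := by
      simp only [pysem]
      rw [← hw]
      simp [PySem.List.slice]
    rw [hslice, Bool.beq_eq_decide_eq]
    have hkey : (PySem.Str.strip x = "##") ↔ (w.all PySem.Chars.isspace = true) := by
      rw [String.ext_iff]
      show (PySem.Str.strip x).toList = "##".toList ↔ _
      rw [PySem.Str.toList_strip, ← hw]
      exact topSec_strip_hash w
    by_cases hww : w.all PySem.Chars.isspace = true
    · simp [hww, hkey.mpr hww]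
    · have hne : ¬ (PySem.Str.strip x = "##") := fun h => hww (hkey.mp h)
      simp only [hne, decide_false]
      simpa using fun h => hww h
  · have hsf : PySem.Str.startswith x "## " = false := by simpa using hs
    rw [hsf, Bool.false_and, Bool.false_and]

theorem topSec_nb_eq (x : String) : (PySem.Str.strip x != "") = topSecNB x := by
  have hbeq : (PySem.Str.strip x == "") = x.toList.all PySem.Chars.isspace := by
    rw [Bool.beq_eq_decide_eq]
    by_cases h : x.toList.all PySem.Chars.isspace = true
    · have : PySem.Str.strip x = "" := by
        apply String.toList_eq_nil_iff.mp
        rw [PySem.Str.toList_strip]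
        exact topSec_strip_of_all_space _ h
      simp [this, h]
    · have : ¬ (PySem.Str.strip x = "") := by
        intro h0
        apply h
        apply topSec_all_space_of_strip
        rw [← PySem.Str.toList_strip, h0]
        rfl
      simp only [this, decide_false]
      simpa using fun h0 => h h0
  unfold topSecNB
  rw [bne, hbeq]

theorem topSec_tw_all {α : Type} (p : α → Bool) (l : List α)
    (h : (l.takeWhile p).length = l.length) : ∀ x ∈ l, p x = true := by
  have heq : l.takeWhile p = l := (List.takeWhile_prefix p).eq_of_length h
  intro x hx
  exact List.mem_takeWhile_imp (heq ▸ hx)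

theorem topSec_last_form (ls : List String) :
    (ls.any topSecEH && ((ls.reverse.takeWhile (fun x => !topSecEH x)).reverse.takeWhile
        (fun x => !PySem.Str.startswith x "## ")).any topSecNB) = topSecBad ls := by
  induction ls with
  | nil => rfl
  | cons l r ih =>
    rw [topSecBad, List.reverse_cons, List.takeWhile_append]
    by_cases hr : r.any topSecEH = true
    · have hcond : ¬ ((r.reverse.takeWhile (fun x => !topSecEH x)).length = r.reverse.length) := by
        intro hlen
        rcases List.any_eq_true.mp hr with ⟨x, hx, hex⟩
        have := topSec_tw_all _ _ hlen x (List.mem_reverse.mpr hx)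
        rw [hex] at this
        simp at this
      rw [if_neg hcond]
      simp only [List.any_cons, hr, Bool.or_true, Bool.true_and, if_true]
      have := ih
      rw [hr, Bool.true_and] at this
      rw [this, ite_self]
    · have hrf : r.any topSecEH = false := by simpa using hr
      have hall : ∀ x ∈ r.reverse, (!topSecEH x) = true := by
        intro x hx
        simp [List.any_eq_false.mp hrf x (List.mem_reverse.mp hx)]
      have htw : r.reverse.takeWhile (fun x => !topSecEH x) = r.reverse :=
        List.takeWhile_eq_self_iff.mpr hall
      rw [if_pos (by rw [htw])]
      by_cases hel : topSecEH l = true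
      · have h1 : List.takeWhile (fun x => !topSecEH x) [l] = [] := by
          simp [hel]
        rw [h1, List.append_nil, List.reverse_reverse]
        simp only [List.any_cons, hel, Bool.true_or, Bool.true_and, if_true, hrf,
          Bool.false_eq_true, if_false]
      · have helf : topSecEH l = false := by simpa using hel
        have h1 : List.takeWhile (fun x => !topSecEH x) [l] = [l] := by
          simp [helf]
        rw [h1, helf]
        simp only [List.any_cons, helf, Bool.false_or, hrf, Bool.false_and,
          Bool.false_eq_true, if_false]
        rw [← ih, hrf, Bool.false_and]

theorem topSec_D_iff (text : String) :
    D_top_sections_py text ↔ topSecBad (PySem.Str.splitlines text) = true := by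
  unfold D_top_sections_py
  simp only [topSec_eh_eq, topSec_nb_eq]
  rw [topSec_last_form]

-- ===== VERDICT (by name: the statement is the Claim_ definition above) =====
theorem top_sections_py_spec : Claim_unchanged_top_sections_py := by
  intro text _ hD
  unfold top_sections_py top_sections_py_alt
  have hbad : topSecBad (PySem.Str.splitlines text) = false := by
    by_cases h : topSecBad (PySem.Str.splitlines text) = true
    · exact absurd ((topSec_D_iff text).mpr h) hD
    · simpa using h
  have := (topSec_main (PySem.Str.splitlines text).length (PySem.Str.splitlines text)
    (le_refl _) hbad PySem.Dict.empty PySem.Dict.empty ""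
    (by simp [PySem.Dict.keys, PySem.Dict.empty]) (Or.inl rfl)).1 (by rfl)
  exact congrArg PySem.Dict.items this

theorem top_sections_py_changed : Claim_changed_top_sections_py := by
  unfold Claim_changed_top_sections_py
  refine ⟨by decide, by decide, by decide, ?_, by decide⟩
  show top_sections_py_alt pvDiffWitness_top_sections_py = pvDiffWitnessOut_top_sections_py.2
  unfold top_sections_py_alt pvDiffWitness_top_sections_py
  have hs : PySem.Str.splitlines "## \nx" = ["## ", "x"] := by decide
  rw [hs, topSecBGo_cons_header _ _ _ (by decide)]
  have hd : List.dropWhile (fun x => !PySem.Str.startswith x "## ") ["x"] = [] := by decide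
  rw [hd, topSecBGo]
  decide

theorem top_sections_py_tight : Claim_exact_top_sections_py := by
  intro text _ hD heq
  replace hD : topSecBad (PySem.Str.splitlines text) = true := (topSec_D_iff text).mp hD
  unfold top_sections_py top_sections_py_alt at heq
  have hdicts : topSecFin (topSecAGo (PySem.Str.splitlines text) PySem.Dict.empty "")
      = topSecBGo (PySem.Str.splitlines text) PySem.Dict.empty := PySem.Dict.ext heq
  have hA : (topSecFin (topSecAGo (PySem.Str.splitlines text) PySem.Dict.empty "")).get? ""
      = some "" := by
    apply topSec_fin_get
    · exact topSecAGo_nodup _ _ _ (by simp [PySem.Dict.keys, PySem.Dict.empty])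
    · rw [topSecAGo_get, topSec_anyEH_of_bad _ hD]
      simp
  rcases topSecBGo_get_bad (PySem.Str.splitlines text).length (PySem.Str.splitlines text)
    (le_refl _) hD PySem.Dict.empty with ⟨v, hv, hB⟩
  rw [hdicts, hB] at hA
  exact hv (Option.some.inj hA)
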